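-- pv_equiv track=rewrite | github.com/Benjtkim/CS111_Work | Problem Set 5/ps5pr3.py | most_consonants
-- ===== SOURCE A (Python) =====
-- def num_vowels(s):
--    '''Find the number of vowels in a string
--       using a list comprehension.'''
--
--    lc = [1 for c in s if c in 'aeiou']
--    return sum(lc)
--
-- def most_consonants(words):
--     '''Takes a list of strings (words) and returns the word with the most
--     consonants.'''
--     if words == []:
--         return ''
--     else:
--         rest = most_consonants(words[1:])
--         if (len(words[0]) - num_vowels(words[0])) > (len(rest) - num_vowels(rest)):
--             return words[0]
--         else:
--             return rest
-- ===== SOURCE B (Python) =====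
-- def num_vowels(s):
--    '''Find the number of vowels in a string
--       using a list comprehension.'''
--
--    lc = [1 for c in s if c in 'aeiou']
--    return sum(lc)
--
-- def most_consonants(words):
--     '''Takes a list of strings (words) and returns the word with the most
--     consonants.'''
--     best = ''
--     best_count = 0
--     for w in reversed(words):
--         c = len(w) - num_vowels(w)
--         if c > best_count:
--             best, best_count = w, c
--     return best
-- ===== Notes on version B (the rewrite author's own statement) =====
-- stated objective: faster
-- what changed: Replaced the naive recursion (which re-counts the vowels of the running best word at every level) with a single right-to-left loop that caches the current best consonant count, preserving the rightmost-wins tie-break.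
import Mathlib
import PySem

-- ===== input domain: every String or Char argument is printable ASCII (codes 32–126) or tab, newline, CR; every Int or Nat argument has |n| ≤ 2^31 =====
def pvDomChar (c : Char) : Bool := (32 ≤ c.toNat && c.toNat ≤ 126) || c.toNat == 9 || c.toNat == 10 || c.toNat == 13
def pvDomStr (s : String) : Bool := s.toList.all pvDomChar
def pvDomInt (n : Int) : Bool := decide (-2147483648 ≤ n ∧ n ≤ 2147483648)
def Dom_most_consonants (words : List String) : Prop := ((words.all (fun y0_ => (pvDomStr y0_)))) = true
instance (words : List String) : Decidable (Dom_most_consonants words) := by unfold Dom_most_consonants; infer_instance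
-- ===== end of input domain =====

-- B: iterative reverse scan caching the best consonant count instead of A's recursion that recounts the best word's vowels at every level.
-- NOTE: equivalence is about the return value; neither program mutates its argument.

-- ===== PORT A =====
-- num_vowels: sum of [1 for c in s if c in 'aeiou']
def pv_num_vowels (s : String) : Int :=
  ((s.toList.filter (fun c => ['a','e','i','o','u'].contains c)).map (fun _ => (1 : Int))).sum

def most_consonants (words : List String) : String :=
  match words with
  | [] => ""
  | w :: ws =>
    let rest := most_consonants ws
    if PySem.Str.len w - pv_num_vowels w > PySem.Str.len rest - pv_num_vowels rest then w
    else rest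

-- ===== PORT B =====
-- B keeps num_vowels as-is, so its port reuses pv_num_vowels above.
-- loop body of B's for-loop over reversed(words)
def pv_step (st : String × Int) (w : String) : String × Int :=
  let c := PySem.Str.len w - pv_num_vowels w
  if c > st.2 then (w, c) else st

def most_consonants_alt (words : List String) : String :=
  (words.reverse.foldl pv_step ("", 0)).1

-- ===== PRECONDITION & SPEC =====
def Spec_most_consonants (words : List String) (out : String) : Prop := out = most_consonants_alt words
instance (words : List String) (out : String) : Decidable (Spec_most_consonants words out) := by unfold Spec_most_consonants; infer_instance

-- ===== CLAIM (what is proved, stated in full; the proofs are below) =====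
def Claim_equal_most_consonants : Prop := ∀ (words : List String), Dom_most_consonants words → Spec_most_consonants words (most_consonants words)

-- ===== LEMMAS AND PROOFS =====

-- ===== VERDICT (by name: the statement is the Claim_ definition above) =====
-- the loop state is exactly (A's result, its consonant count)
lemma pv_invariant (words : List String) :
    words.reverse.foldl pv_step ("", 0) =
      (most_consonants words,
       PySem.Str.len (most_consonants words) - pv_num_vowels (most_consonants words)) := by
  induction words with
  | nil => simp [most_consonants, pv_num_vowels, PySem.Str.len]
  | cons w ws ih =>
    simp only [List.reverse_cons, List.foldl_append, ih, List.foldl_cons, List.foldl_nil]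
    show pv_step _ w = _
    simp only [pv_step, most_consonants, pv_num_vowels, pv_num_vowels]
    split_ifs <;> simp_all

theorem most_consonants_spec : Claim_equal_most_consonants := by
  intro words _
  show most_consonants words = most_consonants_alt words
  unfold most_consonants_alt
  rw [pv_invariant]
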